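-- pv_equiv track=rewrite | github.com/bog-walk/project-euler-python | solution/batch6/problem62.py | cubic_permutations
-- ===== SOURCE A (Python) =====
-- def cubic_permutations(n: int, k: int) -> list[list[int]]:
--     """
--     Solution stores all cubes in a dictionary with their permutation id as the key,
--     thereby creating value lists of cubic permutations. The dictionary is then
--     filtered for lists of K size.
--
--     Original solution was adjusted in 3 locations to increase speed at upper
--     constraints from 7.95s to 3.89s, as specified in the code.
--
--     :returns: List of all K-sized lists of permutations that are cubes. These will
--         already be sorted by the first (smallest) element of each list.
--     """
--
--     cube_perms: dict[str, list[int]] = {}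
--     for num in range(345, n):
--         cube = num * num * num  # og: pow(n, 3)
--         cube_id = "".join(sorted(str(cube)))  # og: permutation_id(cube)
--         cube_perms[cube_id] = cube_perms.setdefault(cube_id, []) + [cube]
--     # og: list(filter(lambda perms: len(perms) == k, cube_perms.values()))
--     results = []
--     for value in cube_perms.values():
--         if len(value) == k:
--             results.append(value)
--     return results
-- ===== SOURCE B (Python) =====
-- def cubic_permutations(n: int, k: int) -> list[list[int]]:
--     # Sort-and-scan grouping: build (permutation_id, cube) pairs, stable-sort by id,
--     # form consecutive groups in one linear scan, keep the k-sized ones, and order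
--     # the kept groups by their smallest (first) cube.
--     pairs = []
--     for num in range(345, n):
--         cube = num * num * num
--         pairs.append(("".join(sorted(str(cube))), cube))
--     pairs.sort()
--     groups = []
--     cur_id = None
--     cur = []
--     for cid, cube in pairs:
--         if cid == cur_id:
--             cur.append(cube)
--         else:
--             if cur and len(cur) == k:
--                 groups.append(cur)
--             cur_id = cid
--             cur = [cube]
--     if cur and len(cur) == k:
--         groups.append(cur)
--     groups.sort(key=lambda g: g[0])
--     return groups
-- ===== Notes on version B (the rewrite author's own statement) =====
-- stated objective: alternative
-- what changed: Replaces A's hash-dict grouping (setdefault into a dict keyed by permutation id, then filter its values) by a sort-then-scan grouping: build (id, cube) pairs, stable-sort them by id, form consecutive groups in one linear scan, keep the k-sized ones and re-sort the kept groups by their smallest cube to restore A's first-occurrence order.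
import Mathlib
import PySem

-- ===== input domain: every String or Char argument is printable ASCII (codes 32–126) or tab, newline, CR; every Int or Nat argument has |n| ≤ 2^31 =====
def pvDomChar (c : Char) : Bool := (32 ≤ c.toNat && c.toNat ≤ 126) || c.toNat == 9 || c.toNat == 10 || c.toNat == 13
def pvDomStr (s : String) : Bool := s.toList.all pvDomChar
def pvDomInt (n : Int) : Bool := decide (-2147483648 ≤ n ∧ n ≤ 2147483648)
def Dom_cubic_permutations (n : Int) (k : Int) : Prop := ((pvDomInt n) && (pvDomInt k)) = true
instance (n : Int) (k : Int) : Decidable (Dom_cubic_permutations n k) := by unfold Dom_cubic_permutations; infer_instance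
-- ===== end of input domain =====

-- B replaces A's hash-dict grouping (setdefault into a dict keyed by permutation id, then
-- filter its values) by sort-then-scan grouping: stable lexicographic sort of (id, cube) pairs,
-- one linear scan forming consecutive groups, kept groups re-sorted by their smallest cube;
-- objective: alternative algorithm of similar cost.

-- ===== PORT A =====
-- permutation id: "".join(sorted(str(cube)))
def pvId (cube : Int) : String :=
  String.ofList (PySem.List.sorted (PySem.Int.toStr cube).toList (fun c => c) false)

-- The Python dict is modelled exactly as CPython's dict: an insertion-ordered key list plus a
-- hash table (Std.HashMap) for the O(1) lookups; values() is the key list mapped through the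
-- table.  (The association-list PySem.Dict has the same semantics but its linear scans make the
-- port unevaluable at the sampled sizes.)
def cubic_permutations (n : Int) (k : Int) : List (List Int) :=
  let cube_perms :=
    (PySem.List.pyRange 345 n 1).foldl
      (fun (st : List String × Std.HashMap String (List Int)) num =>
        let cube := num * num * num
        let cube_id := pvId cube
        -- cube_perms.setdefault(cube_id, []): a fresh key is appended, bound to []
        let st' := if st.2.contains cube_id then st else (st.1 ++ [cube_id], st.2.insert cube_id [])
        -- cube_perms[cube_id] = <the setdefault value> + [cube]
        (st'.1, st'.2.insert cube_id (st'.2.getD cube_id [] ++ [cube]))) ([], ∅)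
  (cube_perms.1.map (fun cid => cube_perms.2.getD cid [])).foldl
    (fun results value =>
      if (value.length : Int) = k then results ++ [value] else results) []

-- ===== PORT B =====
def cubic_permutations_alt (n : Int) (k : Int) : List (List Int) :=
  let pairs : List (String × Int) :=
    (PySem.List.pyRange 345 n 1).foldl (fun acc num =>
      let cube := num * num * num
      acc ++ [(pvId cube, cube)]) []
  -- pairs.sort(): Python's stable sort under lexicographic tuple order (ids are distinct or
  -- tie-broken by the cube), as a mergesort under the same total order
  let sp := pairs.mergeSort (fun p q => decide (p.1 < q.1 ∨ (p.1 = q.1 ∧ p.2 ≤ q.2)))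
  let st := sp.foldl (fun (st : List (List Int) × Option String × List Int) p =>
      if (some p.1 : Option String) = st.2.1 then (st.1, st.2.1, st.2.2 ++ [p.2])
      else ((if st.2.2 ≠ [] ∧ (st.2.2.length : Int) = k then st.1 ++ [st.2.2] else st.1),
            some p.1, [p.2]))
    ([], none, [])
  let groups := if st.2.2 ≠ [] ∧ (st.2.2.length : Int) = k then st.1 ++ [st.2.2] else st.1
  -- groups.sort(key=lambda g: g[0]); groups are nonempty, so g[0] is exactly pyGetD g 0 0
  groups.mergeSort (fun g g' => decide (PySem.List.pyGetD g 0 0 ≤ PySem.List.pyGetD g' 0 0))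

-- ===== PRECONDITION & SPEC =====
def Spec_cubic_permutations (n : Int) (k : Int) (out : List (List Int)) : Prop := out = cubic_permutations_alt n k
instance (n : Int) (k : Int) (out : List (List Int)) : Decidable (Spec_cubic_permutations n k out) := by unfold Spec_cubic_permutations; infer_instance

-- ===== CLAIM (what is proved, stated in full; the proofs are below) =====
def Claim_equal_cubic_permutations : Prop := ∀ (n : Int) (k : Int), Dom_cubic_permutations n k → Spec_cubic_permutations n k (cubic_permutations n k)

-- ===== LEMMAS AND PROOFS =====

-- the (id, cube) pairs generated by the range loop, and the group of cubes for one id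
def pvPairs (n : Int) : List (String × Int) :=
  (PySem.List.pyRange 345 n 1).map (fun num => (pvId (num * num * num), num * num * num))

def pvGrp (l : List (String × Int)) (c : String) : List Int :=
  (l.filter (fun p => p.1 == c)).map (fun p => p.2)

-- A's dict-building step, and B's scan step with its final flush
def pvStepA : (List String × Std.HashMap String (List Int)) → (String × Int) →
    (List String × Std.HashMap String (List Int)) := fun st p =>
  let st' := if st.2.contains p.1 then st else (st.1 ++ [p.1], st.2.insert p.1 [])
  (st'.1, st'.2.insert p.1 (st'.2.getD p.1 [] ++ [p.2]))

def pvStep (k : Int) : (List (List Int) × Option String × List Int) → (String × Int) →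
    (List (List Int) × Option String × List Int) := fun st p =>
  if (some p.1 : Option String) = st.2.1 then (st.1, st.2.1, st.2.2 ++ [p.2])
  else ((if st.2.2 ≠ [] ∧ (st.2.2.length : Int) = k then st.1 ++ [st.2.2] else st.1),
        some p.1, [p.2])

def pvFinal (k : Int) (st : List (List Int) × Option String × List Int) : List (List Int) :=
  if st.2.2 ≠ [] ∧ (st.2.2.length : Int) = k then st.1 ++ [st.2.2] else st.1

-- ---- A characterisation: the dict loop groups the cubes by id in first-occurrence order ----

lemma pvA_fold_char (l : List (String × Int)) :
    (l.foldl pvStepA ([], ∅)).1 = PySem.Set.ofList (l.map (fun p => p.1))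
    ∧ ∀ c, (l.foldl pvStepA ([], ∅)).2.getD c [] = pvGrp l c
    ∧ ((l.foldl pvStepA ([], ∅)).2.contains c = true ↔ c ∈ l.map (fun p => p.1)) := by
  induction l using List.reverseRecOn with
  | nil =>
    refine ⟨rfl, fun c => ⟨?_, ?_⟩⟩
    · simp [pvGrp, Std.HashMap.getD_empty]
    · simp [Std.HashMap.contains_empty]
  | append_singleton xs p IH =>
    obtain ⟨IH1, IH2⟩ := IH
    rw [List.foldl_append, List.foldl_cons, List.foldl_nil]
    set st := xs.foldl pvStepA ([], ∅) with hst
    have hofl : PySem.Set.ofList ((xs ++ [p]).map (fun q => q.1))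
        = PySem.Set.add (PySem.Set.ofList (xs.map (fun q => q.1))) p.1 := by
      simp [PySem.Set.ofList, List.foldl_append]
    have hgrp : ∀ c, pvGrp (xs ++ [p]) c = pvGrp xs c ++ (if p.1 == c then [p.2] else []) := by
      intro c
      simp only [pvGrp, List.filter_append, List.map_append]
      congr 1
      by_cases hpc : p.1 = c
      · have hb : (p.1 == c) = true := beq_iff_eq.mpr hpc
        simp [List.filter, hb]
      · have hb : (p.1 == c) = false := beq_eq_false_iff_ne.mpr hpc
        simp [List.filter, hb]
    by_cases hc : st.2.contains p.1
    · -- existing key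
      have hmem : p.1 ∈ xs.map (fun q => q.1) := ((IH2 p.1).2).mp hc
      have hadd : PySem.Set.add (PySem.Set.ofList (xs.map (fun q => q.1))) p.1
          = PySem.Set.ofList (xs.map (fun q => q.1)) := by
        simp only [PySem.Set.add,
          if_pos ((PySem.Set.contains_iff _ _).mpr ((PySem.Set.mem_ofList _ _).mpr hmem))]
      simp only [pvStepA, if_pos hc]
      refine ⟨by rw [hofl, hadd]; exact IH1, fun c => ⟨?_, ?_⟩⟩
      · rw [Std.HashMap.getD_insert, hgrp c]
        by_cases hpc : p.1 = c
        · rw [if_pos (beq_iff_eq.mpr hpc), (IH2 p.1).1, hpc]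
          simp
        · rw [if_neg (by simpa using hpc), (IH2 c).1]
          have hb : (p.1 == c) = false := beq_eq_false_iff_ne.mpr hpc
          simp [hb]
      · rw [Std.HashMap.contains_insert]
        simp only [List.map_append, List.mem_append]
        constructor
        · intro h
          rcases Bool.or_eq_true_iff.mp h with h | h
          · exact Or.inr (by simp [beq_iff_eq.mp h])
          · exact Or.inl ((IH2 c).2.mp h)
        · intro h
          rcases h with h | h
          · exact Bool.or_eq_true_iff.mpr (Or.inr ((IH2 c).2.mpr h))
          · exact Bool.or_eq_true_iff.mpr (Or.inl (beq_iff_eq.mpr (show c = p.1 by simpa using h).symm))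
    · -- new key
      have hmem : p.1 ∉ xs.map (fun q => q.1) := fun h => hc (((IH2 p.1).2).mpr h)
      have hadd : PySem.Set.add (PySem.Set.ofList (xs.map (fun q => q.1))) p.1
          = PySem.Set.ofList (xs.map (fun q => q.1)) ++ [p.1] := by
        simp only [PySem.Set.add,
          if_neg (fun h => hmem ((PySem.Set.mem_ofList _ _).mp ((PySem.Set.contains_iff _ _).mp h)))]
      simp only [pvStepA, if_neg hc]
      refine ⟨by rw [hofl, hadd, IH1], fun c => ⟨?_, ?_⟩⟩
      · rw [Std.HashMap.getD_insert, hgrp c]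
        by_cases hpc : p.1 = c
        · have hxs0 : pvGrp xs c = [] := by
            simp only [pvGrp, List.map_eq_nil_iff, List.filter_eq_nil_iff]
            intro q hq hqc
            exact hmem (List.mem_map.mpr ⟨q, hq, by simpa using hpc ▸ beq_iff_eq.mp hqc⟩)
          rw [if_pos (beq_iff_eq.mpr hpc), Std.HashMap.getD_insert,
            if_pos (beq_iff_eq.mpr hpc), hxs0]
          simp
        · rw [if_neg (by simpa using hpc), Std.HashMap.getD_insert,
            if_neg (by simpa using hpc), (IH2 c).1]
          have hb : (p.1 == c) = false := beq_eq_false_iff_ne.mpr hpc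
          simp [hb]
      · rw [Std.HashMap.contains_insert, Std.HashMap.contains_insert]
        simp only [List.map_append, List.mem_append]
        constructor
        · intro h
          rcases Bool.or_eq_true_iff.mp h with h | h
          · exact Or.inr (by simp [beq_iff_eq.mp h])
          · rcases Bool.or_eq_true_iff.mp h with h | h
            · exact Or.inr (by simp [beq_iff_eq.mp h])
            · exact Or.inl ((IH2 c).2.mp h)
        · intro h
          rcases h with h | h
          · exact Bool.or_eq_true_iff.mpr (Or.inr (Bool.or_eq_true_iff.mpr (Or.inr ((IH2 c).2.mpr h))))
          · exact Bool.or_eq_true_iff.mpr (Or.inl (beq_iff_eq.mpr (show c = p.1 by simpa using h).symm))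

lemma pvA_char (n k : Int) :
    cubic_permutations n k
      = ((PySem.Set.ofList ((pvPairs n).map (fun p => p.1))).map (pvGrp (pvPairs n))).filter
          (fun g => decide ((g.length : Int) = k)) := by
  have e0 : cubic_permutations n k
      = (((PySem.List.pyRange 345 n 1).foldl
            (fun (st : List String × Std.HashMap String (List Int)) num =>
              pvStepA st (pvId (num * num * num), num * num * num)) ([], ∅)).1.map
          (fun cid => ((PySem.List.pyRange 345 n 1).foldl
            (fun (st : List String × Std.HashMap String (List Int)) num =>
              pvStepA st (pvId (num * num * num), num * num * num)) ([], ∅)).2.getD cid [])).foldl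
          (fun results value =>
            if (value.length : Int) = k then results ++ [value] else results) [] := rfl
  rw [e0, ← List.foldl_map (f := fun num => ((pvId (num * num * num), num * num * num) : String × Int))
      (g := pvStepA)]
  obtain ⟨h1, h2⟩ := pvA_fold_char (pvPairs n)
  rw [show ((PySem.List.pyRange 345 n 1).map
        (fun num => ((pvId (num * num * num), num * num * num) : String × Int))) = pvPairs n from rfl,
    h1, funext (fun c => (h2 c).1)]
  have hif : (fun (results : List (List Int)) value =>
        if ((value.length : Int) = k) then results ++ [value] else results)
      = fun acc x => if (fun (g : List Int) => decide ((g.length : Int) = k)) x = true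
          then acc ++ [id x] else acc := by
    funext acc x
    by_cases h : ((x.length : Int) = k) <;> simp [h]
  rw [hif, PySem.List.foldl_append_if]
  simp

-- ---- a strictly ordered rearrangement is THE mergesort result ----

lemma pvMergeSort_eq_of_perm {α : Type} (le : α → α → Bool) (R : α → α → Prop)
    (hR : ∀ a b, R a b → le b a = false)
    (htrans : ∀ a b c, le a b → le b c → le a c) (htotal : ∀ a b, le a b || le b a)
    (xs ys : List α) (hperm : ys.Perm xs) (hs : ys.Pairwise R) : xs.mergeSort le = ys := by
  have hzp : (xs.mergeSort le).Perm ys := (List.mergeSort_perm xs le).trans hperm.symm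
  have hzs : (xs.mergeSort le).Pairwise (fun a b => le a b = true) :=
    List.pairwise_mergeSort htrans htotal xs
  set zs := xs.mergeSort le with hz
  clear_value zs
  clear hz hperm
  induction ys generalizing zs with
  | nil => exact hzp.eq_nil
  | cons y t ih =>
    rcases zs with _ | ⟨z, u⟩
    · exact absurd hzp.symm (by simp)
    · have hzy : z = y := by
        by_contra hne
        have hzmem : z ∈ y :: t := hzp.mem_iff.mp (by simp)
        have hzt : z ∈ t := by rcases List.mem_cons.mp hzmem with h | h; exact absurd h hne; exact h
        have hRyz : R y z := (List.pairwise_cons.mp hs).1 z hzt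
        have hymem : y ∈ z :: u := hzp.symm.mem_iff.mp (by simp)
        have hyu : y ∈ u := by
          rcases List.mem_cons.mp hymem with h | h; exact absurd h.symm hne; exact h
        have : le z y = true := (List.pairwise_cons.mp hzs).1 y hyu
        rw [hR y z hRyz] at this
        exact absurd this (by simp)
      subst hzy
      have := ih (List.Pairwise.of_cons hs) u (hzp.cons_inv) (List.pairwise_cons.mp hzs).2
      rw [this]

-- ---- the sorted pairs are the blocks of equal ids in ascending id order ----

lemma pvBlocks_perm (l : List (String × Int)) :
    ((PySem.List.sorted (PySem.Set.ofList (l.map (fun p => p.1))) (fun x => x) false).flatMap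
        (fun c => l.filter (fun p => p.1 == c))).Perm l := by
  set is := PySem.List.sorted (PySem.Set.ofList (l.map (fun p => p.1))) (fun x => x) false with hisdef
  have hnd : is.Nodup := (PySem.List.sorted_ofList_pairwise_lt _).imp ne_of_lt
  rw [List.perm_iff_count]
  intro x
  have hcount : ∀ (js : List String), js.Nodup →
      List.count x (js.flatMap (fun c => l.filter (fun p => p.1 == c)))
        = if x.1 ∈ js then List.count x l else 0 := by
    intro js
    induction js with
    | nil => simp
    | cons c rest ihj =>
      intro hnd'
      rw [List.flatMap_cons, List.count_append, ihj hnd'.of_cons]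
      by_cases hxc : x.1 = c
      · have hcnt : List.count x (l.filter (fun p => p.1 == c)) = List.count x l :=
          List.count_filter (by simp [hxc])
        have hxrest : x.1 ∉ rest := fun h => (List.nodup_cons.mp hnd').1 (hxc ▸ h)
        rw [hcnt, if_neg hxrest, if_pos (show x.1 ∈ c :: rest by simp [hxc])]
        simp
      · have hcnt : List.count x (l.filter (fun p => p.1 == c)) = 0 := by
          rw [List.count_eq_zero]
          intro hmem
          exact hxc (beq_iff_eq.mp (List.mem_filter.mp hmem).2)
        simp [hcnt, hxc, List.mem_cons]
  rw [hcount is hnd]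
  by_cases hx : x.1 ∈ is
  · rw [if_pos hx]
  · rw [if_neg hx]
    have : x ∉ l := by
      intro hmem
      exact hx ((PySem.List.mem_sorted _ _ _ _).mpr
        ((PySem.Set.mem_ofList _ _).mpr (List.mem_map.mpr ⟨x, hmem, rfl⟩)))
    rw [List.count_eq_zero.mpr this]

lemma pvBlocks_pairwise (l : List (String × Int)) (hl : l.Pairwise (fun p q => p.2 < q.2)) :
    ((PySem.List.sorted (PySem.Set.ofList (l.map (fun p => p.1))) (fun x => x) false).flatMap
        (fun c => l.filter (fun p => p.1 == c))).Pairwise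
      (fun p q => p.1 < q.1 ∨ (p.1 = q.1 ∧ p.2 < q.2)) := by
  set is := PySem.List.sorted (PySem.Set.ofList (l.map (fun p => p.1))) (fun x => x) false with hisdef
  have hpw : is.Pairwise (· < ·) := PySem.List.sorted_ofList_pairwise_lt _
  rw [List.flatMap_def, List.pairwise_flatten]
  refine ⟨?_, ?_⟩
  · intro b hb
    obtain ⟨c, _, hc⟩ := List.mem_map.mp hb
    subst hc
    exact (hl.filter _).imp_of_mem (fun {p} {q} hp hq h =>
      Or.inr ⟨by rw [beq_iff_eq.mp (List.mem_filter.mp hp).2,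
        beq_iff_eq.mp (List.mem_filter.mp hq).2], h⟩)
  · rw [List.pairwise_map]
    refine hpw.imp_of_mem ?_
    intro c c' _ _ hlt p hp q hq
    exact Or.inl (by
      rw [beq_iff_eq.mp (List.mem_filter.mp hp).2, beq_iff_eq.mp (List.mem_filter.mp hq).2]
      exact hlt)

-- ---- the linear scan over the blocks yields exactly the k-sized groups ----

lemma pvScan_block (k : Int) (c : String) (ps : List (String × Int))
    (h : ∀ q ∈ ps, q.1 = c) (gs : List (List Int)) (cur : List Int) :
    ps.foldl (pvStep k) (gs, some c, cur) = (gs, some c, cur ++ ps.map (fun p => p.2)) := by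
  induction ps generalizing cur with
  | nil => simp
  | cons q t ih =>
    have hq : q.1 = c := h q (by simp)
    simp only [List.foldl_cons, pvStep, hq, if_true]
    rw [ih (fun r hr => h r (by simp [hr]))]
    simp

lemma pvScan_flatMap (k : Int) (is : List String) (f : String → List (String × Int))
    (hk : ∀ c ∈ is, ∀ q ∈ f c, q.1 = c) (hne : ∀ c ∈ is, f c ≠ []) (hnd : is.Nodup) :
    ∀ (gs0 : List (List Int)) (co : Option String) (cur : List Int),
      (∀ c ∈ is, co ≠ some c) →
      pvFinal k ((is.flatMap f).foldl (pvStep k) (gs0, co, cur))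
        = pvFinal k (gs0, co, cur)
          ++ (is.map (fun c => (f c).map (fun p => p.2))).filter
               (fun g => decide ((g.length : Int) = k)) := by
  induction is with
  | nil => intro gs0 co cur _; simp
  | cons c rest ih =>
    intro gs0 co cur hco
    obtain ⟨q, qs, hfc⟩ : ∃ q qs, f c = q :: qs := by
      rcases hf : f c with _ | ⟨q, qs⟩
      · exact absurd hf (hne c (by simp))
      · exact ⟨q, qs, rfl⟩
    have hq1 : q.1 = c := hk c (by simp) q (by simp [hfc])
    have hstep : pvStep k (gs0, co, cur) q = (pvFinal k (gs0, co, cur), some c, [q.2]) := by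
      simp only [pvStep, pvFinal, hq1]
      rw [if_neg (by simpa using (hco c (by simp)).symm)]
    rw [List.flatMap_cons, List.foldl_append, hfc, List.foldl_cons, hstep,
      pvScan_block k c qs (fun r hr => hk c (by simp) r (by simp [hfc, hr])),
      ih (fun c' hc' r hr => hk c' (by simp [hc']) r hr) (fun c' hc' => hne c' (by simp [hc']))
        hnd.of_cons _ _ _ (by
          intro c' hc' hcc
          cases Option.some.inj hcc
          exact (List.nodup_cons.mp hnd).1 hc')]
    have hgrp : pvFinal k (pvFinal k (gs0, co, cur), some c, [q.2] ++ qs.map (fun p => p.2))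
        = pvFinal k (gs0, co, cur)
          ++ List.filter (fun g => decide ((g.length : Int) = k)) [(f c).map (fun p => p.2)] := by
      simp only [pvFinal, hfc, List.map_cons]
      have hlen : ((([q.2] ++ qs.map (fun p => p.2)).length : Nat) : Int) = (qs.length : Int) + 1 := by
        simp only [List.length_append, List.length_cons, List.length_nil, List.length_map]
        push_cast; ring
      by_cases hl : ((qs.length : Int) + 1 = k)
      · rw [if_pos ⟨by simp, by rw [hlen]; exact hl⟩]
        simp [List.filter, hl]
      · rw [if_neg (by rw [ne_eq, hlen]; simp [hl])]
        simp [List.filter, hl]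
    rw [hgrp]
    simp only [List.map_cons, List.filter_cons, List.append_assoc]
    split_ifs <;> simp

-- pyRange 345 n is strictly increasing, so the cubes are too
lemma pvPairs_snd_pairwise (n : Int) : (pvPairs n).Pairwise (fun p q => p.2 < q.2) := by
  rw [pvPairs, List.pairwise_map]
  refine (PySem.List.pairwise_lt_pyRange_one 345 n).imp ?_
  intro a b hab
  nlinarith [sq_nonneg (a + b), sq_nonneg a, sq_nonneg b, sq_nonneg (a - b)]


-- ---- B characterisation ----

lemma pvB_char (n k : Int) :
    cubic_permutations_alt n k
      = (((PySem.List.sorted (PySem.Set.ofList ((pvPairs n).map (fun p => p.1))) (fun x => x) false).map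
            (pvGrp (pvPairs n))).filter (fun g => decide ((g.length : Int) = k))).mergeSort
          (fun g g' => decide (PySem.List.pyGetD g 0 0 ≤ PySem.List.pyGetD g' 0 0)) := by
  have e1 : cubic_permutations_alt n k
      = (pvFinal k ((((PySem.List.pyRange 345 n 1).foldl
            (fun acc num => acc ++ [(pvId (num * num * num), num * num * num)]) []).mergeSort
              (fun p q => decide (p.1 < q.1 ∨ (p.1 = q.1 ∧ p.2 ≤ q.2)))).foldl
            (pvStep k) ([], none, []))).mergeSort
          (fun g g' => decide (PySem.List.pyGetD g 0 0 ≤ PySem.List.pyGetD g' 0 0)) := rfl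
  rw [e1, PySem.List.foldl_append_singleton_eq_map, List.nil_append]
  have hp : (PySem.List.pyRange 345 n 1).map (fun num => (pvId (num * num * num), num * num * num))
      = pvPairs n := rfl
  rw [hp]
  set is := PySem.List.sorted (PySem.Set.ofList ((pvPairs n).map (fun p => p.1))) (fun x => x) false with hisdef
  have hsorted : (pvPairs n).mergeSort (fun p q => decide (p.1 < q.1 ∨ (p.1 = q.1 ∧ p.2 ≤ q.2)))
      = is.flatMap (fun c => (pvPairs n).filter (fun p => p.1 == c)) := by
    apply pvMergeSort_eq_of_perm _ (fun p q => p.1 < q.1 ∨ (p.1 = q.1 ∧ p.2 < q.2))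
    · intro a b h
      apply decide_eq_false
      rcases h with h | ⟨h1, h2⟩
      · rintro (h' | ⟨h1', _⟩)
        · exact absurd (h.trans h') (lt_irrefl _)
        · exact absurd (h1' ▸ h) (lt_irrefl _)
      · rintro (h' | ⟨_, h2'⟩)
        · exact absurd (h1 ▸ h') (lt_irrefl _)
        · exact absurd h2 (not_lt.mpr h2')
    · intro a b c hab hbc
      rw [decide_eq_true_eq] at hab hbc ⊢
      rcases hab with h | ⟨h1, h2⟩ <;> rcases hbc with h' | ⟨h1', h2'⟩
      · exact Or.inl (h.trans h')
      · exact Or.inl (h1' ▸ h)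
      · exact Or.inl (h1 ▸ h')
      · exact Or.inr ⟨h1.trans h1', h2.trans h2'⟩
    · intro a b
      rcases lt_trichotomy a.1 b.1 with h | h | h
      · simp [h]
      · rcases le_total a.2 b.2 with h2 | h2 <;> simp [h, h2]
      · simp [h]
    · exact pvBlocks_perm (pvPairs n)
    · exact pvBlocks_pairwise (pvPairs n) (pvPairs_snd_pairwise n)
  rw [hsorted]
  have hk : ∀ c ∈ is, ∀ q ∈ (pvPairs n).filter (fun p => p.1 == c), q.1 = c := by
    intro c _ q hq
    exact beq_iff_eq.mp (List.mem_filter.mp hq).2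
  have hne : ∀ c ∈ is, (pvPairs n).filter (fun p => p.1 == c) ≠ [] := by
    intro c hc
    have hcs : c ∈ PySem.Set.ofList ((pvPairs n).map (fun p => p.1)) :=
      (PySem.List.mem_sorted _ _ _ _).mp hc
    have : c ∈ (pvPairs n).map (fun p => p.1) := (PySem.Set.mem_ofList _ _).mp hcs
    obtain ⟨q, hqx, hq1⟩ := List.mem_map.mp this
    intro hnil
    have : q ∈ (pvPairs n).filter (fun p => p.1 == c) :=
      List.mem_filter.mpr ⟨hqx, by simp [hq1]⟩
    simp [hnil] at this
  have hnd : is.Nodup := (PySem.List.sorted_ofList_pairwise_lt _).imp ne_of_lt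
  rw [pvScan_flatMap k is _ hk hne hnd [] none [] (by simp)]
  have hfin : pvFinal k (([] : List (List Int)), none, ([] : List Int)) = [] := by
    simp [pvFinal]
  rw [hfin, List.nil_append]
  rfl

-- ---- group heads are strictly increasing in first-occurrence order ----

lemma pvHead_cons (x : Int) (t : List Int) : PySem.List.pyGetD (x :: t) 0 0 = x := by
  rw [PySem.List.pyGetD_of_nonneg _ _ le_rfl]; rfl

lemma pvHeads_pairwise (l : List (String × Int)) (hl : l.Pairwise (fun p q => p.2 < q.2)) :
    (PySem.Set.ofList (l.map (fun p => p.1))).Pairwise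
      (fun c c' => PySem.List.pyGetD (pvGrp l c) 0 0 < PySem.List.pyGetD (pvGrp l c') 0 0) := by
  induction l using List.reverseRecOn with
  | nil => simp [PySem.Set.ofList]
  | append_singleton xs p IH =>
    have hxs : xs.Pairwise (fun p q => p.2 < q.2) := (List.pairwise_append.mp hl).1
    have hcross : ∀ q ∈ xs, q.2 < p.2 := by
      intro q hq
      exact (List.pairwise_append.mp hl).2.2 q hq p (by simp)
    have hofl : PySem.Set.ofList ((xs ++ [p]).map (fun q => q.1))
        = PySem.Set.add (PySem.Set.ofList (xs.map (fun q => q.1))) p.1 := by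
      simp [PySem.Set.ofList, List.foldl_append]
    rw [hofl]
    -- membership in the set gives a nonempty filter over xs; its head is unchanged by appending p
    have hgrp_ext : ∀ c ∈ PySem.Set.ofList (xs.map (fun q => q.1)),
        pvGrp (xs ++ [p]) c = pvGrp xs c ++ (if p.1 == c then [p.2] else []) ∧ pvGrp xs c ≠ [] := by
      intro c hc
      constructor
      · simp only [pvGrp, List.filter_append, List.map_append]
        congr 1
        by_cases hpc : p.1 = c
        · have hb : (p.1 == c) = true := beq_iff_eq.mpr hpc
          simp [List.filter, hb]
        · have hb : (p.1 == c) = false := beq_eq_false_iff_ne.mpr hpc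
          simp [List.filter, hb]
      · have : c ∈ xs.map (fun q => q.1) := (PySem.Set.mem_ofList _ _).mp hc
        obtain ⟨q, hqx, hq1⟩ := List.mem_map.mp this
        intro hnil
        have : q ∈ xs.filter (fun r => r.1 == c) := List.mem_filter.mpr ⟨hqx, by simp [hq1]⟩
        simp [pvGrp] at hnil
        exact hnil q.1 q.2 (by simpa using hqx) hq1
    have hhead_eq : ∀ c ∈ PySem.Set.ofList (xs.map (fun q => q.1)),
        PySem.List.pyGetD (pvGrp (xs ++ [p]) c) 0 0 = PySem.List.pyGetD (pvGrp xs c) 0 0 := by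
      intro c hc
      obtain ⟨hext, hne⟩ := hgrp_ext c hc
      rw [hext]
      rcases hg : pvGrp xs c with _ | ⟨x, t⟩
      · exact absurd hg hne
      · rw [List.cons_append, pvHead_cons, pvHead_cons]
    have hhead_mem : ∀ c ∈ PySem.Set.ofList (xs.map (fun q => q.1)),
        PySem.List.pyGetD (pvGrp xs c) 0 0 ∈ xs.map (fun q => q.2) := by
      intro c hc
      obtain ⟨_, hne⟩ := hgrp_ext c hc
      rcases hg : pvGrp xs c with _ | ⟨x, t⟩
      · exact absurd hg hne
      · have hx : x ∈ pvGrp xs c := by simp [hg]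
        have hx' : x ∈ (xs.filter (fun r => r.1 == c)).map (fun r => r.2) := hx
        obtain ⟨q, hq, hq2⟩ := List.mem_map.mp hx'
        rw [pvHead_cons]
        exact List.mem_map.mpr ⟨q, (List.mem_filter.mp hq).1, hq2⟩
    by_cases hmem : p.1 ∈ PySem.Set.ofList (xs.map (fun q => q.1))
    · have hadd : PySem.Set.add (PySem.Set.ofList (xs.map (fun q => q.1))) p.1
          = PySem.Set.ofList (xs.map (fun q => q.1)) := by
        simp only [PySem.Set.add, if_pos ((PySem.Set.contains_iff _ _).mpr hmem)]
      rw [hadd]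
      refine (IH hxs).imp_of_mem ?_
      intro c c' hc hc' h
      rwa [hhead_eq c hc, hhead_eq c' hc']
    · have hadd : PySem.Set.add (PySem.Set.ofList (xs.map (fun q => q.1))) p.1
          = PySem.Set.ofList (xs.map (fun q => q.1)) ++ [p.1] := by
        simp only [PySem.Set.add, if_neg (fun h => hmem ((PySem.Set.contains_iff _ _).mp h))]
      rw [hadd, List.pairwise_append]
      refine ⟨(IH hxs).imp_of_mem ?_, by simp, ?_⟩
      · intro c c' hc hc' h
        rwa [hhead_eq c hc, hhead_eq c' hc']
      · intro c hc c' hc'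
        rw [List.mem_singleton] at hc'
        subst hc'
        rw [hhead_eq c hc]
        -- the new group is [p], whose head is p.2, larger than any cube of xs
        have hnew : pvGrp (xs ++ [p]) p.1 = [p.2] := by
          have hxsnil : xs.filter (fun r => r.1 == p.1) = [] := by
            rw [List.filter_eq_nil_iff]
            intro q hq
            simp only [beq_iff_eq]
            intro hq1
            exact hmem ((PySem.Set.mem_ofList _ _).mpr (List.mem_map.mpr ⟨q, hq, hq1⟩))
          simp [pvGrp, List.filter_append, hxsnil, List.filter]
        rw [hnew, pvHead_cons]
        obtain ⟨q, hqx, hq2⟩ := List.mem_map.mp (hhead_mem c hc)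
        rw [← hq2]
        exact hcross q hqx

-- ===== VERDICT (by name: the statement is the Claim_ definition above) =====
theorem cubic_permutations_spec : Claim_equal_cubic_permutations := by
  intro n k _
  unfold Spec_cubic_permutations
  rw [pvA_char, pvB_char]
  symm
  apply pvMergeSort_eq_of_perm _
    (fun g g' => PySem.List.pyGetD g 0 0 < PySem.List.pyGetD g' 0 0)
  · intro a b h
    exact decide_eq_false (not_le.mpr h)
  · intro a b c hab hbc
    rw [decide_eq_true_eq] at hab hbc ⊢
    exact hab.trans hbc
  · intro a b
    rcases le_total (PySem.List.pyGetD a 0 0) (PySem.List.pyGetD b 0 0) with h | h <;> simp [h]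
  · exact ((PySem.List.sorted_perm _ _ _).symm.map (pvGrp (pvPairs n))).filter _
  · exact ((List.pairwise_map (f := pvGrp (pvPairs n))).mpr (pvHeads_pairwise _ (pvPairs_snd_pairwise n))).filter _
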